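-- pv_equiv track=rewrite | github.com/DevelopingProgress/Algo | 3/anagramCounting.py | Grupuj
-- ===== SOURCE A (Python) =====
-- def Policz(slowo):
--     wynik = 1
--     for znak in slowo:
--         if znak.isalpha():
--             wynik *= (ord(znak.lower()) - ord('a') + 1)
--     return wynik
--
-- def Grupuj(wyrazy):
--     slownik = {}
--     for wyraz in wyrazy:
--         hash = Policz(wyraz)
--         if hash not in slownik.keys():
--             lista = [wyraz]
--             slownik[hash] = lista
--         else:
--             slownik[hash].append(wyraz)
--     return slownik
-- ===== SOURCE B (Python) =====
-- def Policz(slowo):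
--     wynik = 1
--     for znak in slowo:
--         if znak.isalpha():
--             wynik *= (ord(znak.lower()) - ord('a') + 1)
--     return wynik
--
-- def Grupuj(wyrazy):
--     klucze = dict.fromkeys(Policz(wyraz) for wyraz in wyrazy)
--     return {h: [wyraz for wyraz in wyrazy if Policz(wyraz) == h] for h in klucze}
-- ===== Notes on version B (the rewrite author's own statement) =====
-- stated objective: alternative
-- what changed: B replaces A's one-pass bucket insertion into a mutable dict by a two-phase gather: first collect the distinct hashes in first-occurrence order (dict.fromkeys), then build each group with one filtering pass over the words per key.
import Mathlib
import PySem

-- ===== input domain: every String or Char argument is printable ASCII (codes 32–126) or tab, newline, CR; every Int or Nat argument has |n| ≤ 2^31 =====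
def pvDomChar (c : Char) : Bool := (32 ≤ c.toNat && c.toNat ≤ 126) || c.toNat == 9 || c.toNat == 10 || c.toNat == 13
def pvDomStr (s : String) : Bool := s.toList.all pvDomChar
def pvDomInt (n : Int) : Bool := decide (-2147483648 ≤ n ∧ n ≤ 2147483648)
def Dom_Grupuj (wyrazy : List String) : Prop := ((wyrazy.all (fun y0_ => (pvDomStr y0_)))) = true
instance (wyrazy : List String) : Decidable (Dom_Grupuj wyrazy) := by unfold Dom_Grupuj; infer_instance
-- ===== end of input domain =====

-- B builds the groups in two phases (distinct hashes in first-occurrence order, then one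
-- filtering pass per key) instead of A's one-pass bucket insertion into a dict; alternative
-- decomposition, same return value.


-- ===== PORT A =====
-- 'Policz': product of letter values (a=1 … z=26) over the alphabetic characters
def GrupujPolicz (slowo : String) : Int :=
  slowo.toList.foldl
    (fun wynik znak =>
      if PySem.Chars.isalpha znak then
        wynik * (((PySem.Chars.lowerChar znak).toNat : Int) - 97 + 1)
      else wynik)
    1

def Grupuj (wyrazy : List String) : List (Int × List String) :=
  (wyrazy.foldl
    (fun slownik wyraz =>
      let h := GrupujPolicz wyraz
      if !(slownik.contains h) then slownik.insert h [wyraz]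
      else slownik.modify h [] (fun lista => lista ++ [wyraz]))
    PySem.Dict.empty).items

-- ===== PORT B =====
def Grupuj_alt (wyrazy : List String) : List (Int × List String) :=
  (PySem.List.dedup (wyrazy.map GrupujPolicz)).map
    (fun h => (h, wyrazy.filter (fun wyraz => GrupujPolicz wyraz == h)))

-- ===== PRECONDITION & SPEC =====
def Spec_Grupuj (wyrazy : List String) (out : List (Int × List String)) : Prop := out = Grupuj_alt wyrazy
instance (wyrazy : List String) (out : List (Int × List String)) : Decidable (Spec_Grupuj wyrazy out) := by unfold Spec_Grupuj; infer_instance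

-- ===== CLAIM (what is proved, stated in full; the proofs are below) =====
def Claim_equal_Grupuj : Prop := ∀ (wyrazy : List String), Dom_Grupuj wyrazy → Spec_Grupuj wyrazy (Grupuj wyrazy)

-- ===== LEMMAS AND PROOFS =====

-- A's loop body is exactly 'modify': inserting a fresh key with [w] is modify with default [].
theorem grupuj_step_eq_modify (d : PySem.Dict Int (List String)) (w : String) :
    (if !(d.contains (GrupujPolicz w)) then d.insert (GrupujPolicz w) [w]
     else d.modify (GrupujPolicz w) [] (fun lista => lista ++ [w]))
      = d.modify (GrupujPolicz w) [] (fun lista => lista ++ [w]) := by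
  by_cases h : d.contains (GrupujPolicz w) = true
  · simp [h]
  · simp only [Bool.not_eq_true] at h
    simp [h, PySem.Dict.modify, PySem.Dict.getD_of_not_contains _ _ h]

theorem grupuj_fold_eq (wyrazy : List String) :
    wyrazy.foldl
      (fun slownik wyraz =>
        let h := GrupujPolicz wyraz
        if !(slownik.contains h) then slownik.insert h [wyraz]
        else slownik.modify h [] (fun lista => lista ++ [wyraz]))
      PySem.Dict.empty
    = wyrazy.foldl
        (fun slownik wyraz => slownik.modify (GrupujPolicz wyraz) [] (fun lista => lista ++ [wyraz]))
        PySem.Dict.empty := by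
  apply PySem.List.foldl_congr_mem
  intro d w _
  exact grupuj_step_eq_modify d w

theorem grupuj_fold_getD (wyrazy : List String) (c : Int) :
    (wyrazy.foldl
      (fun slownik wyraz => slownik.modify (GrupujPolicz wyraz) [] (fun lista => lista ++ [wyraz]))
      PySem.Dict.empty).getD c []
    = wyrazy.filter (fun wyraz => GrupujPolicz wyraz == c) := by
  have hmap :
      wyrazy.foldl
        (fun slownik wyraz => slownik.modify (GrupujPolicz wyraz) [] (fun lista => lista ++ [wyraz]))
        PySem.Dict.empty
      = (wyrazy.map (fun w => (GrupujPolicz w, w))).foldl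
          (fun slownik p => slownik.modify p.1 [] (fun lista => lista ++ [p.2]))
          PySem.Dict.empty := by
    rw [List.foldl_map]
  rw [hmap, PySem.Dict.getD_foldl_modify_append]
  simp [List.filter_map, List.map_map, Function.comp_def]

-- ===== VERDICT (by name: the statement is the Claim_ definition above) =====
theorem Grupuj_spec : Claim_equal_Grupuj := by
  intro wyrazy _
  unfold Spec_Grupuj Grupuj Grupuj_alt
  rw [grupuj_fold_eq]
  set D := wyrazy.foldl
    (fun slownik wyraz => slownik.modify (GrupujPolicz wyraz) [] (fun lista => lista ++ [wyraz]))
    PySem.Dict.empty with hD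
  have hkeys : D.keys = PySem.Set.ofList (wyrazy.map GrupujPolicz) := by
    rw [hD, PySem.Dict.keys_foldl_modify_key, PySem.Dict.keys_empty,
      PySem.Set.update_nil_left]
  have hnd : D.keys.Nodup := by
    rw [hkeys]; exact PySem.Set.nodup_ofList _
  rw [PySem.Dict.items_eq_map_keys D hnd [], hkeys, PySem.List.dedup_eq_ofList]
  apply List.map_congr_left
  intro k _
  rw [hD, grupuj_fold_getD]
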